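-- pv_equiv track=rewrite | github.com/ElliotRedhead/AdventOfCode23 | day02/day02.py | convert_re_matches_to_max_occurrence
-- ===== SOURCE A (Python) =====
-- def convert_re_matches_to_max_occurrence(
--     re_matches: list[tuple[str, ...]]
-- ) -> dict[str, int]:
--     """Create a dict of max occurrences of colours."""
--     max_colour_counts: dict[str, int] = {}
--     for re_match in re_matches:
--         colour_name = re_match[2]
--         colour_count = int(re_match[1])
--         if colour_name in max_colour_counts:
--             if colour_count > max_colour_counts[colour_name]:
--                 max_colour_counts[colour_name] = colour_count
--         else:
--             max_colour_counts[colour_name] = colour_count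
--     return max_colour_counts
-- ===== SOURCE B (Python) =====
-- def convert_re_matches_to_max_occurrence(re_matches):
--     """Two passes: group all counts per colour, then take max of each group."""
--     groups = {}
--     for re_match in re_matches:
--         groups[re_match[2]] = groups.get(re_match[2], []) + [int(re_match[1])]
--     return {colour: max(counts) for colour, counts in groups.items()}
-- ===== Notes on version B (the rewrite author's own statement) =====
-- stated objective: alternative
-- what changed: B replaces A's single pass with a running per-colour max by two separate passes: first grouping every count into a dict of lists keyed by colour (first-appearance order), then a dict comprehension taking max of each group.
import Mathlib
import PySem

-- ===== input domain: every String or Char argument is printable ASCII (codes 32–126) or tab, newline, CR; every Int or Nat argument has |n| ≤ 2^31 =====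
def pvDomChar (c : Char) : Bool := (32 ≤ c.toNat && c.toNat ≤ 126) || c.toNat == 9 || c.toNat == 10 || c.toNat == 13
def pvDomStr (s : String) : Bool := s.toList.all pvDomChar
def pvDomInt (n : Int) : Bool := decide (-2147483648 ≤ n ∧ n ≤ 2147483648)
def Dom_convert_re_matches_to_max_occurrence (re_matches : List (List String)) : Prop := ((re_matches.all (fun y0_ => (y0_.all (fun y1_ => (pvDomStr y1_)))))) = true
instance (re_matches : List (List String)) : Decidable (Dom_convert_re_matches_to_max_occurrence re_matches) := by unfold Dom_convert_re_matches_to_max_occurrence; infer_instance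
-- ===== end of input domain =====

-- B replaces A's single running-max pass by two passes (group counts per colour, then max per group); alternative decomposition, same cost.


-- ===== PORT A =====
-- Single pass keeping the running maximum per colour in a dict.
def convert_re_matches_to_max_occurrence (re_matches : List (List String)) : List (String × Int) :=
  (re_matches.foldl
    (fun max_colour_counts re_match =>
      let colour_name := PySem.List.pyGetD re_match 2 ""
      let colour_count := (PySem.Int.ofStr? (PySem.List.pyGetD re_match 1 "")).getD 0
      if max_colour_counts.contains colour_name then
        if colour_count > max_colour_counts.getD colour_name 0 then
          max_colour_counts.insert colour_name colour_count
        else max_colour_counts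
      else max_colour_counts.insert colour_name colour_count)
    PySem.Dict.empty).items

-- ===== PORT B =====
-- Pass 1: group every count into a list per colour; pass 2: map max over the groups.
def convert_re_matches_to_max_occurrence_alt (re_matches : List (List String)) : List (String × Int) :=
  let groups : PySem.Dict String (List Int) :=
    re_matches.foldl
      (fun groups re_match =>
        groups.modify (PySem.List.pyGetD re_match 2 "") []
          (· ++ [(PySem.Int.ofStr? (PySem.List.pyGetD re_match 1 "")).getD 0]))
      PySem.Dict.empty
  groups.items.map (fun p => (p.1, (PySem.List.max? p.2 id).getD 0))

-- ===== PRECONDITION & SPEC =====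
-- Pre_ excludes exactly the inputs on which Python A raises: a match with fewer than 3 fields
-- (IndexError) or whose field 1 is not int-parseable (ValueError).
def Pre_convert_re_matches_to_max_occurrence (re_matches : List (List String)) : Prop :=
  (re_matches.all (fun m =>
    decide (3 ≤ m.length) && (PySem.Int.ofStr? (PySem.List.pyGetD m 1 "")).isSome)) = true
instance (re_matches : List (List String)) : Decidable (Pre_convert_re_matches_to_max_occurrence re_matches) := by unfold Pre_convert_re_matches_to_max_occurrence; infer_instance

def pvWitness_convert_re_matches_to_max_occurrence : List (List String) :=
  [["3 red", "3", "red"], ["1 blue", "1", "blue"], ["5 red", "5", "red"]]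

def Spec_convert_re_matches_to_max_occurrence (re_matches : List (List String)) (out : List (String × Int)) : Prop := out = convert_re_matches_to_max_occurrence_alt re_matches
instance (re_matches : List (List String)) (out : List (String × Int)) : Decidable (Spec_convert_re_matches_to_max_occurrence re_matches out) := by unfold Spec_convert_re_matches_to_max_occurrence; infer_instance

-- ===== CLAIM (what is proved, stated in full; the proofs are below) =====
def Claim_equal_convert_re_matches_to_max_occurrence : Prop := ∀ (re_matches : List (List String)), Dom_convert_re_matches_to_max_occurrence re_matches → Pre_convert_re_matches_to_max_occurrence re_matches → Spec_convert_re_matches_to_max_occurrence re_matches (convert_re_matches_to_max_occurrence re_matches)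

-- ===== LEMMAS AND PROOFS =====

-- A's loop step / B's grouping step, as named functions (each is the lambda of its port).
def pvStepA (d : PySem.Dict String Int) (re_match : List String) : PySem.Dict String Int :=
  let colour_name := PySem.List.pyGetD re_match 2 ""
  let colour_count := (PySem.Int.ofStr? (PySem.List.pyGetD re_match 1 "")).getD 0
  if d.contains colour_name then
    if colour_count > d.getD colour_name 0 then d.insert colour_name colour_count else d
  else d.insert colour_name colour_count

def pvStepB (g : PySem.Dict String (List Int)) (re_match : List String) : PySem.Dict String (List Int) :=
  g.modify (PySem.List.pyGetD re_match 2 "") []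
    (· ++ [(PySem.Int.ofStr? (PySem.List.pyGetD re_match 1 "")).getD 0])

-- project a group to its max (B's second pass)
def pvProj (p : String × List Int) : String × Int := (p.1, (PySem.List.max? p.2 id).getD 0)

lemma pvMax?_append_singleton (v : List Int) (n : Int) :
    PySem.List.max? (v ++ [n]) id =
      match PySem.List.max? v id with
      | none => some n
      | some m => if m < n then some n else some m := by
  simp only [PySem.List.max?, List.foldl_append, List.foldl_cons, List.foldl_nil]
  generalize List.foldl _ (none : Option Int) v = a
  cases a <;> simp

lemma pvMax?_isSome (v : List Int) (hv : v ≠ []) : (PySem.List.max? v id).isSome := by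
  induction v using List.reverseRecOn with
  | nil => exact absurd rfl hv
  | append_singleton xs x _ =>
    rw [pvMax?_append_singleton]
    cases PySem.List.max? xs id with
    | none => rfl
    | some m => by_cases h : m < x <;> simp [h]

-- a member of the group dict whose key is the looked-up key is the looked-up entry
lemma pvMem_eq (g : PySem.Dict String (List Int)) (hnd : g.keys.Nodup) {k : String}
    {v : List Int} {p : String × List Int}
    (hgv : g.get? k = some v) (hp : p ∈ g.items) (hpk : p.1 = k) : p = (k, v) := by
  obtain ⟨p1, p2⟩ := p
  simp only at hpk
  subst hpk
  have h2 : g.get? p1 = some p2 := PySem.Dict.get?_of_mem_items g hp hnd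
  rw [hgv] at h2
  cases h2
  rfl

-- loop invariant: A's dict is pointwise the max-projection of B's group dict
lemma pvLoop (l : List (List String)) :
    ∀ (d : PySem.Dict String Int) (g : PySem.Dict String (List Int)),
    g.keys.Nodup → (∀ p ∈ g.items, p.2 ≠ []) →
    d.items = g.items.map pvProj →
    (l.foldl pvStepA d).items = ((l.foldl pvStepB g).items).map pvProj := by
  induction l with
  | nil => intro d g _ _ h; simpa using h
  | cons m l ih =>
    intro d g hnd hne hitems
    simp only [List.foldl_cons]
    set k := PySem.List.pyGetD m 2 "" with hk
    set n := (PySem.Int.ofStr? (PySem.List.pyGetD m 1 "")).getD 0 with hn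
    have hkeys : d.keys = g.keys := by
      simp only [PySem.Dict.keys, hitems, List.map_map]
      rfl
    have hdnd : d.keys.Nodup := hkeys ▸ hnd
    have hcont : d.contains k = g.contains k := by
      rw [PySem.Dict.contains_eq_decide_mem_keys, PySem.Dict.contains_eq_decide_mem_keys, hkeys]
    by_cases hc : g.contains k = true
    · -- colour already present in both dicts
      have hgv : g.get? k = some (g.getD k []) := by
        have hiso := PySem.Dict.contains_eq_isSome_get? (d := g) (k := k)
        rw [hc] at hiso
        cases hget : g.get? k with
        | none => rw [hget] at hiso; simp at hiso
        | some v => rw [PySem.Dict.getD_of_get?_eq_some g [] hget]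
      set v := g.getD k [] with hvdef
      have hmemg : (k, v) ∈ g.items := PySem.Dict.mem_items_of_get?_eq_some _ hgv
      have hvne : v ≠ [] := hne _ hmemg
      obtain ⟨m0, hm0⟩ := Option.isSome_iff_exists.mp (pvMax?_isSome v hvne)
      have hdget : d.getD k 0 = m0 := by
        have hmemd : (k, (PySem.List.max? v id).getD 0) ∈ d.items := by
          rw [hitems]; exact List.mem_map_of_mem hmemg
        rw [PySem.Dict.getD_of_mem_items _ hmemd hdnd 0, hm0]
        rfl
      have hB : pvStepB g m = g.insert k (v ++ [n]) := by
        simp only [pvStepB, PySem.Dict.modify, ← hk, ← hn, ← hvdef]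
      rw [hB]
      by_cases hgt : d.getD k 0 < n
      · -- A updates the running max; B appends, and the group max becomes n
        have hA : pvStepA d m = d.insert k n := by
          simp only [pvStepA, ← hk, ← hn, hcont, hc, if_pos, hgt]
        rw [hA]
        apply ih
        · rw [PySem.Dict.keys_insert_of_contains _ _ hc]; exact hnd
        · intro p hp
          rw [PySem.Dict.items_insert_of_contains _ _ hc] at hp
          obtain ⟨q, hq, rfl⟩ := List.mem_map.mp hp
          by_cases hqk : (q.1 == k) = true
          · simp [hqk]
          · simp only [hqk]; exact hne q hq
        · rw [PySem.Dict.items_insert_of_contains _ _ (hcont ▸ hc),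
            PySem.Dict.items_insert_of_contains _ _ hc, hitems, List.map_map, List.map_map]
          apply List.map_congr_left
          intro p hp
          by_cases hpk : p.1 = k
          · have hpv := pvMem_eq g hnd hgv hp hpk
            subst hpv
            rw [hdget] at hgt
            simp [pvProj, pvMax?_append_singleton, hm0, hgt]
          · simp [pvProj, hpk]
      · -- A keeps the old max; B appends, and the group max is unchanged
        have hA : pvStepA d m = d := by
          simp only [pvStepA, ← hk, ← hn, hcont, hc, if_pos, gt_iff_lt, hgt, if_false]
        rw [hA]
        apply ih
        · rw [PySem.Dict.keys_insert_of_contains _ _ hc]; exact hnd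
        · intro p hp
          rw [PySem.Dict.items_insert_of_contains _ _ hc] at hp
          obtain ⟨q, hq, rfl⟩ := List.mem_map.mp hp
          by_cases hqk : (q.1 == k) = true
          · simp [hqk]
          · simp only [hqk]; exact hne q hq
        · rw [PySem.Dict.items_insert_of_contains _ _ hc, hitems, List.map_map]
          apply List.map_congr_left
          intro p hp
          by_cases hpk : p.1 = k
          · have hpv := pvMem_eq g hnd hgv hp hpk
            subst hpv
            rw [hdget] at hgt
            simp [pvProj, pvMax?_append_singleton, hm0, hgt]
          · simp [pvProj, hpk]
    · -- fresh colour: both dicts append a new entry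
      have hc' : g.contains k = false := by simpa using hc
      have hdck : d.contains k = false := by rw [hcont, hc']
      have hA : pvStepA d m = d.insert k n := by
        simp only [pvStepA, ← hk, ← hn, hdck, Bool.false_eq_true, if_false]
      have hB : pvStepB g m = g.insert k [n] := by
        simp only [pvStepB, PySem.Dict.modify, ← hk, ← hn,
          PySem.Dict.getD_of_not_contains g [] hc']
        rfl
      rw [hA, hB]
      apply ih
      · rw [PySem.Dict.keys_insert_of_not_contains _ _ hc']
        refine List.Nodup.append hnd (List.nodup_singleton k) ?_
        intro a ha hb
        simp only [List.mem_singleton] at hb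
        subst hb
        have hck := PySem.Dict.contains_eq_decide_mem_keys g k
        rw [hc'] at hck
        exact absurd ha (by simpa using hck.symm)
      · intro p hp
        rw [PySem.Dict.items_insert_of_not_contains _ _ hc'] at hp
        rcases List.mem_append.mp hp with h | h
        · exact hne _ h
        · simp only [List.mem_singleton] at h; subst h; simp
      · rw [PySem.Dict.items_insert_of_not_contains _ _ hdck,
          PySem.Dict.items_insert_of_not_contains _ _ hc', hitems, List.map_append]
        rfl

-- ===== VERDICT (by name: the statement is the Claim_ definition above) =====
theorem convert_re_matches_to_max_occurrence_spec : Claim_equal_convert_re_matches_to_max_occurrence := by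
  intro re_matches _ _
  show _ = _
  have h := pvLoop re_matches PySem.Dict.empty PySem.Dict.empty (by simp [PySem.Dict.keys, PySem.Dict.empty])
    (by intro p hp; simp [PySem.Dict.empty] at hp) (by rfl)
  simpa [convert_re_matches_to_max_occurrence, convert_re_matches_to_max_occurrence_alt,
    pvStepA, pvStepB, pvProj] using h
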